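-- pv_equiv track=rewrite | github.com/mwisnowski/mtg_python_deckbuilder | code/scripts/extract_themes.py | derive_synergies_for_tags
-- ===== SOURCE A (Python) =====
-- from typing import Dict, List, Set, Any
--
-- def derive_synergies_for_tags(tags: Set[str]) -> Dict[str, List[str]]:
--     # Curated baseline mappings for important themes (extended)
--     pairs = [
--         # Tokens / go-wide
--         ("Tokens Matter", ["Token Creation", "Creature Tokens", "Populate"]),
--         ("Creature Tokens", ["Tokens Matter", "Token Creation", "Populate"]),
--         ("Token Creation", ["Tokens Matter", "Creature Tokens", "Populate"]),
--         # Spells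
--         ("Spellslinger", ["Spells Matter", "Prowess", "Noncreature Spells"]),
--         ("Noncreature Spells", ["Spellslinger", "Prowess"]),
--         ("Prowess", ["Spellslinger", "Noncreature Spells"]),
--         # Artifacts / Enchantments
--         ("Artifacts Matter", ["Treasure Token", "Equipment Matters", "Vehicles", "Improvise"]),
--         ("Enchantments Matter", ["Auras", "Constellation", "Card Draw"]),
--         ("Auras", ["Constellation", "Voltron", "Enchantments Matter"]),
--         ("Treasure Token", ["Sacrifice Matters", "Artifacts Matter", "Ramp"]),
--         ("Vehicles", ["Artifacts Matter", "Crew", "Vehicles"]),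
--         # Counters / Proliferate
--         ("Counters Matter", ["Proliferate", "+1/+1 Counters", "Adapt", "Outlast"]),
--         ("+1/+1 Counters", ["Proliferate", "Counters Matter", "Adapt", "Evolve"]),
--         ("-1/-1 Counters", ["Proliferate", "Counters Matter", "Wither", "Persist", "Infect"]),
--         ("Proliferate", ["Counters Matter", "+1/+1 Counters", "Planeswalkers"]),
--         # Lands / ramp
--         ("Lands Matter", ["Landfall", "Domain", "Land Tutors"]),
--         ("Landfall", ["Lands Matter", "Ramp", "Token Creation"]),
--         ("Domain", ["Lands Matter", "Ramp"]),
--         # Combat / Voltron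
--         ("Voltron", ["Equipment Matters", "Auras", "Double Strike"]),
--         # Card flow
--         ("Card Draw", ["Loot", "Wheels", "Replacement Draw", "Unconditional Draw", "Conditional Draw"]),
--         ("Loot", ["Card Draw", "Discard Matters", "Reanimate"]),
--         ("Wheels", ["Discard Matters", "Card Draw", "Spellslinger"]),
--         ("Discard Matters", ["Loot", "Wheels", "Hellbent", "Reanimate"]),
--         # Sacrifice / death
--         ("Aristocrats", ["Sacrifice", "Death Triggers", "Token Creation"]),
--         ("Sacrifice", ["Aristocrats", "Death Triggers", "Treasure Token"]),
--         ("Death Triggers", ["Aristocrats", "Sacrifice"]),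
--         # Graveyard cluster
--         ("Graveyard Matters", ["Reanimate", "Mill", "Unearth", "Surveil"]),
--         ("Reanimate", ["Mill", "Graveyard Matters", "Enter the Battlefield"]),
--         ("Unearth", ["Reanimate", "Graveyard Matters"]),
--         ("Surveil", ["Mill", "Reanimate", "Graveyard Matters"]),
--         # Planeswalkers / blink
--         ("Superfriends", ["Planeswalkers", "Proliferate", "Token Creation"]),
--         ("Planeswalkers", ["Proliferate", "Superfriends"]),
--         ("Enter the Battlefield", ["Blink", "Reanimate", "Token Creation"]),
--         ("Blink", ["Enter the Battlefield", "Flicker", "Token Creation"]),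
--         # Politics / table dynamics
--         ("Stax", ["Taxing Effects", "Hatebears"]),
--         ("Monarch", ["Politics", "Group Hug", "Card Draw"]),
--         ("Group Hug", ["Politics", "Card Draw"]),
--         # Life
--         ("Life Matters", ["Lifegain", "Lifedrain", "Extort"]),
--         ("Lifegain", ["Life Matters", "Lifedrain", "Extort"]),
--         ("Lifedrain", ["Lifegain", "Life Matters"]),
--         # Treasure / economy cross-link
--         ("Ramp", ["Treasure Token", "Land Tutors"]),
--     ]
--     m: Dict[str, List[str]] = {}
--     for base, syn in pairs:
--         if base in tags:
--             m[base] = syn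
--     return m
-- ===== SOURCE B (Python) =====
-- """Alternative derive_synergies_for_tags: the curated data lives as plain-text lines
-- parsed at import time into a lookup dict; the function drives a loop over the input
-- tags with O(1) lookups and orders the hits by curated rank (so the output matches A's
-- insertion order even though `tags` is a set)."""
-- from typing import Dict, List, Set, Tuple
--
-- _LINES: Tuple[str, ...] = (
--     "Tokens Matter -> Token Creation; Creature Tokens; Populate",
--     "Creature Tokens -> Tokens Matter; Token Creation; Populate",
--     "Token Creation -> Tokens Matter; Creature Tokens; Populate",
--     "Spellslinger -> Spells Matter; Prowess; Noncreature Spells",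
--     "Noncreature Spells -> Spellslinger; Prowess",
--     "Prowess -> Spellslinger; Noncreature Spells",
--     "Artifacts Matter -> Treasure Token; Equipment Matters; Vehicles; Improvise",
--     "Enchantments Matter -> Auras; Constellation; Card Draw",
--     "Auras -> Constellation; Voltron; Enchantments Matter",
--     "Treasure Token -> Sacrifice Matters; Artifacts Matter; Ramp",
--     "Vehicles -> Artifacts Matter; Crew; Vehicles",
--     "Counters Matter -> Proliferate; +1/+1 Counters; Adapt; Outlast",
--     "+1/+1 Counters -> Proliferate; Counters Matter; Adapt; Evolve",
--     "-1/-1 Counters -> Proliferate; Counters Matter; Wither; Persist; Infect",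
--     "Proliferate -> Counters Matter; +1/+1 Counters; Planeswalkers",
--     "Lands Matter -> Landfall; Domain; Land Tutors",
--     "Landfall -> Lands Matter; Ramp; Token Creation",
--     "Domain -> Lands Matter; Ramp",
--     "Voltron -> Equipment Matters; Auras; Double Strike",
--     "Card Draw -> Loot; Wheels; Replacement Draw; Unconditional Draw; Conditional Draw",
--     "Loot -> Card Draw; Discard Matters; Reanimate",
--     "Wheels -> Discard Matters; Card Draw; Spellslinger",
--     "Discard Matters -> Loot; Wheels; Hellbent; Reanimate",
--     "Aristocrats -> Sacrifice; Death Triggers; Token Creation",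
--     "Sacrifice -> Aristocrats; Death Triggers; Treasure Token",
--     "Death Triggers -> Aristocrats; Sacrifice",
--     "Graveyard Matters -> Reanimate; Mill; Unearth; Surveil",
--     "Reanimate -> Mill; Graveyard Matters; Enter the Battlefield",
--     "Unearth -> Reanimate; Graveyard Matters",
--     "Surveil -> Mill; Reanimate; Graveyard Matters",
--     "Superfriends -> Planeswalkers; Proliferate; Token Creation",
--     "Planeswalkers -> Proliferate; Superfriends",
--     "Enter the Battlefield -> Blink; Reanimate; Token Creation",
--     "Blink -> Enter the Battlefield; Flicker; Token Creation",
--     "Stax -> Taxing Effects; Hatebears",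
--     "Monarch -> Politics; Group Hug; Card Draw",
--     "Group Hug -> Politics; Card Draw",
--     "Life Matters -> Lifegain; Lifedrain; Extort",
--     "Lifegain -> Life Matters; Lifedrain; Extort",
--     "Lifedrain -> Lifegain; Life Matters",
--     "Ramp -> Treasure Token; Land Tutors",
-- )
--
--
-- def _parse(lines: Tuple[str, ...]) -> Dict[str, List[str]]:
--     m: Dict[str, List[str]] = {}
--     for line in lines:
--         base, syns = line.split(" -> ")
--         m[base] = syns.split("; ")
--     return m
--
--
-- _MAP: Dict[str, List[str]] = _parse(_LINES)
-- _RANK: Dict[str, int] = {theme: i for i, theme in enumerate(_MAP)}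
--
--
-- def derive_synergies_for_tags(tags: Set[str]) -> Dict[str, List[str]]:
--     present = sorted((t for t in tags if t in _MAP), key=_RANK.__getitem__)
--     return {t: _MAP[t] for t in present}
-- ===== Notes on version B (the rewrite author's own statement) =====
-- stated objective: alternative
-- what changed: B keeps the curated data as a plain-text table parsed once into a lookup dict and drives the loop over the input tags with O(1) lookups (ordering hits by a precomputed curated rank), instead of A's scan over the fixed 41-entry pair-list literal with a membership test per pair.
import Mathlib
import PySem

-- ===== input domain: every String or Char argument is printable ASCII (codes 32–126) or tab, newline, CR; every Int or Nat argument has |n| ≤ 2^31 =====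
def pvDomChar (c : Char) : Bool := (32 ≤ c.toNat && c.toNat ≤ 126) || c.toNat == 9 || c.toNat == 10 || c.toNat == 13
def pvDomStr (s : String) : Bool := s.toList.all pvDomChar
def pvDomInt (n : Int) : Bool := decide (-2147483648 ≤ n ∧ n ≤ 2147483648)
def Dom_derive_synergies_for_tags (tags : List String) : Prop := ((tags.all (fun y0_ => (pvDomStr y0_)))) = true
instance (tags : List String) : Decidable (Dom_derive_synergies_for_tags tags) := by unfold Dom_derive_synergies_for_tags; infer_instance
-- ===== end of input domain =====

-- ===== PORT A =====
-- B re-implements A by parsing a plain-text table into a lookup dict and iterating the input tags with a rank sort, instead of scanning the fixed pair-list literal (objective: alternative).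
-- A's curated pair list, verbatim.
def pvPairsA : List (String × List String) := [
  ("Tokens Matter", ["Token Creation", "Creature Tokens", "Populate"]),
  ("Creature Tokens", ["Tokens Matter", "Token Creation", "Populate"]),
  ("Token Creation", ["Tokens Matter", "Creature Tokens", "Populate"]),
  ("Spellslinger", ["Spells Matter", "Prowess", "Noncreature Spells"]),
  ("Noncreature Spells", ["Spellslinger", "Prowess"]),
  ("Prowess", ["Spellslinger", "Noncreature Spells"]),
  ("Artifacts Matter", ["Treasure Token", "Equipment Matters", "Vehicles", "Improvise"]),
  ("Enchantments Matter", ["Auras", "Constellation", "Card Draw"]),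
  ("Auras", ["Constellation", "Voltron", "Enchantments Matter"]),
  ("Treasure Token", ["Sacrifice Matters", "Artifacts Matter", "Ramp"]),
  ("Vehicles", ["Artifacts Matter", "Crew", "Vehicles"]),
  ("Counters Matter", ["Proliferate", "+1/+1 Counters", "Adapt", "Outlast"]),
  ("+1/+1 Counters", ["Proliferate", "Counters Matter", "Adapt", "Evolve"]),
  ("-1/-1 Counters", ["Proliferate", "Counters Matter", "Wither", "Persist", "Infect"]),
  ("Proliferate", ["Counters Matter", "+1/+1 Counters", "Planeswalkers"]),
  ("Lands Matter", ["Landfall", "Domain", "Land Tutors"]),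
  ("Landfall", ["Lands Matter", "Ramp", "Token Creation"]),
  ("Domain", ["Lands Matter", "Ramp"]),
  ("Voltron", ["Equipment Matters", "Auras", "Double Strike"]),
  ("Card Draw", ["Loot", "Wheels", "Replacement Draw", "Unconditional Draw", "Conditional Draw"]),
  ("Loot", ["Card Draw", "Discard Matters", "Reanimate"]),
  ("Wheels", ["Discard Matters", "Card Draw", "Spellslinger"]),
  ("Discard Matters", ["Loot", "Wheels", "Hellbent", "Reanimate"]),
  ("Aristocrats", ["Sacrifice", "Death Triggers", "Token Creation"]),
  ("Sacrifice", ["Aristocrats", "Death Triggers", "Treasure Token"]),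
  ("Death Triggers", ["Aristocrats", "Sacrifice"]),
  ("Graveyard Matters", ["Reanimate", "Mill", "Unearth", "Surveil"]),
  ("Reanimate", ["Mill", "Graveyard Matters", "Enter the Battlefield"]),
  ("Unearth", ["Reanimate", "Graveyard Matters"]),
  ("Surveil", ["Mill", "Reanimate", "Graveyard Matters"]),
  ("Superfriends", ["Planeswalkers", "Proliferate", "Token Creation"]),
  ("Planeswalkers", ["Proliferate", "Superfriends"]),
  ("Enter the Battlefield", ["Blink", "Reanimate", "Token Creation"]),
  ("Blink", ["Enter the Battlefield", "Flicker", "Token Creation"]),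
  ("Stax", ["Taxing Effects", "Hatebears"]),
  ("Monarch", ["Politics", "Group Hug", "Card Draw"]),
  ("Group Hug", ["Politics", "Card Draw"]),
  ("Life Matters", ["Lifegain", "Lifedrain", "Extort"]),
  ("Lifegain", ["Life Matters", "Lifedrain", "Extort"]),
  ("Lifedrain", ["Lifegain", "Life Matters"]),
  ("Ramp", ["Treasure Token", "Land Tutors"])]

def derive_synergies_for_tags (tags : List String) : List (String × List String) :=
  (pvPairsA.foldl
    (fun m p => if tags.contains p.1 then m.insert p.1 p.2 else m)
    (PySem.Dict.empty : PySem.Dict String (List String))).items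

-- ===== PORT B =====
-- B's curated data is a tuple of plain-text lines, parsed at module load into a
-- lookup dict; the function loops over the input tags.
def pvLinesB : List String := [
  "Tokens Matter -> Token Creation; Creature Tokens; Populate",
  "Creature Tokens -> Tokens Matter; Token Creation; Populate",
  "Token Creation -> Tokens Matter; Creature Tokens; Populate",
  "Spellslinger -> Spells Matter; Prowess; Noncreature Spells",
  "Noncreature Spells -> Spellslinger; Prowess",
  "Prowess -> Spellslinger; Noncreature Spells",
  "Artifacts Matter -> Treasure Token; Equipment Matters; Vehicles; Improvise",
  "Enchantments Matter -> Auras; Constellation; Card Draw",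
  "Auras -> Constellation; Voltron; Enchantments Matter",
  "Treasure Token -> Sacrifice Matters; Artifacts Matter; Ramp",
  "Vehicles -> Artifacts Matter; Crew; Vehicles",
  "Counters Matter -> Proliferate; +1/+1 Counters; Adapt; Outlast",
  "+1/+1 Counters -> Proliferate; Counters Matter; Adapt; Evolve",
  "-1/-1 Counters -> Proliferate; Counters Matter; Wither; Persist; Infect",
  "Proliferate -> Counters Matter; +1/+1 Counters; Planeswalkers",
  "Lands Matter -> Landfall; Domain; Land Tutors",
  "Landfall -> Lands Matter; Ramp; Token Creation",
  "Domain -> Lands Matter; Ramp",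
  "Voltron -> Equipment Matters; Auras; Double Strike",
  "Card Draw -> Loot; Wheels; Replacement Draw; Unconditional Draw; Conditional Draw",
  "Loot -> Card Draw; Discard Matters; Reanimate",
  "Wheels -> Discard Matters; Card Draw; Spellslinger",
  "Discard Matters -> Loot; Wheels; Hellbent; Reanimate",
  "Aristocrats -> Sacrifice; Death Triggers; Token Creation",
  "Sacrifice -> Aristocrats; Death Triggers; Treasure Token",
  "Death Triggers -> Aristocrats; Sacrifice",
  "Graveyard Matters -> Reanimate; Mill; Unearth; Surveil",
  "Reanimate -> Mill; Graveyard Matters; Enter the Battlefield",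
  "Unearth -> Reanimate; Graveyard Matters",
  "Surveil -> Mill; Reanimate; Graveyard Matters",
  "Superfriends -> Planeswalkers; Proliferate; Token Creation",
  "Planeswalkers -> Proliferate; Superfriends",
  "Enter the Battlefield -> Blink; Reanimate; Token Creation",
  "Blink -> Enter the Battlefield; Flicker; Token Creation",
  "Stax -> Taxing Effects; Hatebears",
  "Monarch -> Politics; Group Hug; Card Draw",
  "Group Hug -> Politics; Card Draw",
  "Life Matters -> Lifegain; Lifedrain; Extort",
  "Lifegain -> Life Matters; Lifedrain; Extort",
  "Lifedrain -> Lifegain; Life Matters",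
  "Ramp -> Treasure Token; Land Tutors"]

-- base, syns = line.split(" -> "); the synonym list is syns.split("; ")
-- (every line of the fixed data splits into exactly two parts; on any other shape
--  Python would raise ValueError, which the fallback arm never reaches here)
def pvParseLine (line : String) : String × List String :=
  match PySem.Str.split? line " -> " with
  | some [base, syns] => (base, (PySem.Str.split? syns "; ").getD [syns])
  | _ => ("", [])

-- _MAP = _parse(_LINES)
def pvMapB : PySem.Dict String (List String) :=
  pvLinesB.foldl
    (fun m line => let p := pvParseLine line; m.insert p.1 p.2)
    (PySem.Dict.empty : PySem.Dict String (List String))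

-- _RANK = {theme: i for i, theme in enumerate(_MAP)}
def pvRankB : PySem.Dict String Int :=
  PySem.Dict.ofList ((PySem.List.enumerate (PySem.Dict.keys pvMapB) 0).map (fun p => (p.2, p.1)))

def derive_synergies_for_tags_alt (tags : List String) : List (String × List String) :=
  -- present = sorted((t for t in tags if t in _MAP), key=_RANK.__getitem__)
  -- (_RANK[t] ported as getD with default 0: every t in present is a key of _RANK, so the default is never used)
  -- return {t: _MAP[t] for t in present}  (again getD's default [] is never used)
  ((PySem.List.sorted (tags.filter (fun t => pvMapB.contains t)) (fun t => pvRankB.getD t 0) false).foldl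
    (fun d t => d.insert t (pvMapB.getD t []))
    (PySem.Dict.empty : PySem.Dict String (List String))).items

-- ===== PRECONDITION & SPEC =====
-- In Python `tags` is a set; under the type convention its List representation holds DISTINCT elements,
-- so Pre_ states exactly that representation invariant (it excludes no actual Python input).
def Pre_derive_synergies_for_tags (tags : List String) : Prop := tags.Nodup
instance (tags : List String) : Decidable (Pre_derive_synergies_for_tags tags) := by
  unfold Pre_derive_synergies_for_tags; infer_instance
def pvWitness_derive_synergies_for_tags : List String := ["Ramp", "Blink", "ramp"]

def Spec_derive_synergies_for_tags (tags : List String) (out : List (String × List String)) : Prop := out = derive_synergies_for_tags_alt tags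
instance (tags : List String) (out : List (String × List String)) : Decidable (Spec_derive_synergies_for_tags tags out) := by unfold Spec_derive_synergies_for_tags; infer_instance

-- ===== CLAIM (what is proved, stated in full; the proofs are below) =====
def Claim_equal_derive_synergies_for_tags : Prop := ∀ (tags : List String), Dom_derive_synergies_for_tags tags → Pre_derive_synergies_for_tags tags → Spec_derive_synergies_for_tags tags (derive_synergies_for_tags tags)

-- ===== LEMMAS AND PROOFS =====

-- If `d` returns p.2 on every key p.1 of `ps`, filtering the keys of `ps` and re-pairing them
-- with their `d`-values is the same as filtering `ps` itself (specific glue for B's dict lookup).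
theorem pv_map_filter (d : PySem.Dict String (List String)) (c : String → Bool) :
    ∀ (ps : List (String × List String)), (∀ p ∈ ps, d.getD p.1 [] = p.2) →
      ((ps.map Prod.fst).filter c).map (fun t => (t, d.getD t [])) = ps.filter (fun p => c p.1)
  | [], _ => rfl
  | p :: rest, h => by
    have hp : d.getD p.1 [] = p.2 := h p (List.mem_cons_self ..)
    have ih := pv_map_filter d c rest (fun q hq => h q (List.mem_cons_of_mem _ hq))
    by_cases hc : c p.1 = true
    · simp [hc, hp, ih]
    · simp [hc, ih]

set_option maxRecDepth 100000 in
set_option maxHeartbeats 4000000 in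
theorem pv_spec_aux (tags : List String) (hnd : tags.Nodup) :
    derive_synergies_for_tags tags = derive_synergies_for_tags_alt tags := by
  -- parsing B's text lines yields exactly A's curated dict (one kernel evaluation)
  have hmap : pvMapB = PySem.Dict.ofList pvPairsA := by decide
  have hrank : pvRankB = PySem.Dict.ofList ((PySem.List.enumerate (PySem.Dict.keys (PySem.Dict.ofList pvPairsA)) 0).map (fun p => (p.2, p.1))) := by
    unfold pvRankB; rw [hmap]
  have hnodkeys : (pvPairsA.map Prod.fst).Nodup := by decide
  have hkeys : PySem.Dict.keys pvMapB = pvPairsA.map Prod.fst := by rw [hmap]; decide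
  -- A's fold over the pair list appends exactly the pairs whose base is in tags
  have hA : derive_synergies_for_tags tags = pvPairsA.filter (fun p => tags.contains p.1) := by
    unfold derive_synergies_for_tags
    rw [← List.foldl_filter]
    have h1 := PySem.Dict.items_foldl_insert_fresh (pvPairsA.filter (fun p => tags.contains p.1))
      (fun p => p.1) (fun p => p.2) PySem.Dict.empty
      (fun a _ => PySem.Dict.contains_empty _)
      ((List.filter_sublist.map Prod.fst).nodup hnodkeys)
    simpa using h1
  -- B's sorted present list is the curated key order filtered by tags
  set ys : List String := (pvPairsA.map Prod.fst).filter (fun t => tags.contains t) with hys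
  have hnodys : ys.Nodup := hnodkeys.filter _
  have hperm : ys.Perm (tags.filter (fun t => pvMapB.contains t)) := by
    rw [List.perm_ext_iff_of_nodup hnodys (hnd.filter _)]
    intro x
    simp only [hys, List.mem_filter, PySem.Dict.contains_iff_mem_keys, hkeys]
    simp [and_comm]
  have hpw : ys.Pairwise (fun a b => pvRankB.getD a 0 < pvRankB.getD b 0) := by
    have hranks : (pvPairsA.map Prod.fst).map (fun t => pvRankB.getD t 0) = ([0, 1, 2, 3, 4, 5, 6, 7, 8, 9, 10, 11, 12, 13, 14, 15, 16, 17, 18, 19, 20, 21, 22, 23, 24, 25, 26, 27, 28, 29, 30, 31, 32, 33, 34, 35, 36, 37, 38, 39, 40] : List Int) := by rw [hrank]; decide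
    have base : (pvPairsA.map Prod.fst).Pairwise (fun a b => pvRankB.getD a 0 < pvRankB.getD b 0) := by
      apply List.pairwise_map.mp
      rw [hranks]
      decide
    exact base.filter _
  have hsorted : PySem.List.sorted (tags.filter (fun t => pvMapB.contains t)) (fun t => pvRankB.getD t 0) false = ys :=
    PySem.List.sorted_eq_of_perm_of_pairwise_lt _ _ _ hperm hpw
  have hB : derive_synergies_for_tags_alt tags = ys.map (fun t => (t, pvMapB.getD t [])) := by
    unfold derive_synergies_for_tags_alt
    rw [hsorted]
    have h1 := PySem.Dict.items_foldl_insert_fresh ys (fun t => t) (fun t => pvMapB.getD t [])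
      PySem.Dict.empty (fun a _ => PySem.Dict.contains_empty _) (by simpa using hnodys)
    simpa using h1
  rw [hA, hB, hys, pv_map_filter pvMapB (fun t => tags.contains t) pvPairsA (by rw [hmap]; decide)]

-- ===== VERDICT (by name: the statement is the Claim_ definition above) =====
theorem derive_synergies_for_tags_spec : Claim_equal_derive_synergies_for_tags := by
  intro tags _ hpre
  exact pv_spec_aux tags hpre
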